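-- pv_equiv track=rewrite | github.com/kathyCAN66/KC-Veritas | week1/w1generateDataset.py | choose_label
-- ===== SOURCE A (Python) =====
-- def choose_label(color_gain, size_gain, pos_gain):
--     gains = {
--         "ask_color": color_gain,
--         "ask_size": size_gain,
--         "ask_position": pos_gain
--     }
--
--     max_gain = max(gains.values())
--     best = [k for k, v in gains.items() if v == max_gain]
--
--     if len(best) == 1:
--         return best[0]
--     else:
--         return "ask_any"    # if tie
-- ===== SOURCE B (Python) =====
-- def choose_label(color_gain, size_gain, pos_gain):
--     best_key = "ask_color"
--     best_val = color_gain
--     tie = False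
--     for k, v in (("ask_size", size_gain), ("ask_position", pos_gain)):
--         if v > best_val:
--             best_key, best_val, tie = k, v, False
--         elif v == best_val:
--             tie = True
--     return "ask_any" if tie else best_key
-- ===== Notes on version B (the rewrite author's own statement) =====
-- stated objective: simpler
-- what changed: Replaces the dict + global max() + equality-filter (two passes and a list build) with a single running-best scan over the (label, gain) pairs maintaining best_key/best_val and a tie flag.
import Mathlib
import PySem

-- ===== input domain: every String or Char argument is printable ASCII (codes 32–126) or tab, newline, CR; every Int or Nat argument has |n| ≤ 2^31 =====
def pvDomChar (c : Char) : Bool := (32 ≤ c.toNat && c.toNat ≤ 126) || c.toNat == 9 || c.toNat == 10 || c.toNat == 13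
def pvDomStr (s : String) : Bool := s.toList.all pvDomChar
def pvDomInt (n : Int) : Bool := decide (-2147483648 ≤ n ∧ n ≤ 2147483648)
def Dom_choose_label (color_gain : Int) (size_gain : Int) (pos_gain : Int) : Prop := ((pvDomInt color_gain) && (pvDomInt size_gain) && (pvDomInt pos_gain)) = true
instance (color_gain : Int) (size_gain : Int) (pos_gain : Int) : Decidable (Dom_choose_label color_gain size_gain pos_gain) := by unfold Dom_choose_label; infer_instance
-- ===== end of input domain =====

-- B replaces A's dict + max() + equality-filter with a single running-best scan carrying a tie flag (simpler, one pass).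

-- ===== PORT A =====
def choose_label (color_gain : Int) (size_gain : Int) (pos_gain : Int) : String :=
  let gains : PySem.Dict String Int :=
    (((PySem.Dict.empty).insert "ask_color" color_gain).insert "ask_size" size_gain).insert "ask_position" pos_gain
  match PySem.List.max? (PySem.Dict.values gains) (fun v => v) with
  | none => "ask_any"   -- unreachable: gains is nonempty (Python max would raise only on an empty dict)
  | some max_gain =>
    let best := ((PySem.Dict.items gains).filter (fun kv => kv.2 == max_gain)).map Prod.fst
    if best.length == 1 then (PySem.List.pyGet? best 0).getD "ask_any" else "ask_any"

-- ===== PORT B =====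
def choose_label_alt (color_gain : Int) (size_gain : Int) (pos_gain : Int) : String :=
  let st := [("ask_size", size_gain), ("ask_position", pos_gain)].foldl
    (fun (st : String × Int × Bool) kv =>
      if kv.2 > st.2.1 then (kv.1, kv.2, false)
      else if kv.2 == st.2.1 then (st.1, st.2.1, true)
      else st)
    ("ask_color", color_gain, false)
  if st.2.2 then "ask_any" else st.1

-- ===== PRECONDITION & SPEC =====
def Spec_choose_label (color_gain : Int) (size_gain : Int) (pos_gain : Int) (out : String) : Prop := out = choose_label_alt color_gain size_gain pos_gain
instance (color_gain : Int) (size_gain : Int) (pos_gain : Int) (out : String) : Decidable (Spec_choose_label color_gain size_gain pos_gain out) := by unfold Spec_choose_label; infer_instance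

-- ===== CLAIM (what is proved, stated in full; the proofs are below) =====
def Claim_equal_choose_label : Prop := ∀ (color_gain : Int) (size_gain : Int) (pos_gain : Int), Dom_choose_label color_gain size_gain pos_gain → Spec_choose_label color_gain size_gain pos_gain (choose_label color_gain size_gain pos_gain)

-- ===== LEMMAS AND PROOFS =====
theorem gains_values (c s p : Int) :
    PySem.Dict.values ((((PySem.Dict.empty).insert "ask_color" c).insert "ask_size" s).insert "ask_position" p) = [c, s, p] := rfl

theorem gains_items (c s p : Int) :
    PySem.Dict.items ((((PySem.Dict.empty).insert "ask_color" c).insert "ask_size" s).insert "ask_position" p) = [("ask_color", c), ("ask_size", s), ("ask_position", p)] := rfl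

-- ===== VERDICT (by name: the statement is the Claim_ definition above) =====
set_option maxHeartbeats 2000000 in
theorem choose_label_spec : Claim_equal_choose_label := by
  intro c s p _
  unfold Spec_choose_label choose_label choose_label_alt
  simp only [gains_values, gains_items]
  simp only [PySem.List.max?, PySem.List.pyGet?, PySem.List.pyIdx?, List.foldl, List.filter_cons, List.filter_nil]
  split_ifs <;> simp_all <;> split_ifs <;> simp_all <;> first | omega | (split_ifs <;> simp_all)
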